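-- pv_equiv track=rewrite | github.com/rdtsc/codeeval-solutions | src/moderate/broken-lcd/solutions/python/solution.py | canDisplay
-- ===== SOURCE A (Python) =====
-- def canDisplay(number, segments):
--   if len(number) > len(segments):
--     return False
--
--   for i in range(len(segments) - len(number) + 1):
--     isFit = True
--
--     for j in range(i, i + len(number)):
--       if segments[j] & number[j - i] != number[j - i]:
--         isFit = False
--         break
--
--     if isFit:
--       return True
--
--   return False
-- ===== SOURCE B (Python) =====
-- def canDisplay(number, segments):
--   m = len(number)
--   if m == 0:
--     return True
--   if m > len(segments):
--     return False
--   goal = 1 << (m - 1)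
--   masks = {}
--   state = 0
--   for s in segments:
--     mask = masks.get(s)
--     if mask is None:
--       mask = 0
--       bit = 1
--       for n in number:
--         if s & n == n:
--           mask |= bit
--         bit <<= 1
--       masks[s] = mask
--     state = ((state << 1) | 1) & mask
--     if state & goal:
--       return True
--   return False
-- ===== Notes on version B (the rewrite author's own statement) =====
-- stated objective: alternative
-- what changed: Replaces A's sliding-window rescan at every offset with a bitap (Shift-And) automaton: one left-to-right pass over segments carrying an integer state whose bit k records that number[0..k] matches ending at the current segment, driven by a per-segment-value mask table built on demand; same worst-case cost, a genuinely different matching mechanism (word-parallel on the pattern length).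
import Mathlib
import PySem

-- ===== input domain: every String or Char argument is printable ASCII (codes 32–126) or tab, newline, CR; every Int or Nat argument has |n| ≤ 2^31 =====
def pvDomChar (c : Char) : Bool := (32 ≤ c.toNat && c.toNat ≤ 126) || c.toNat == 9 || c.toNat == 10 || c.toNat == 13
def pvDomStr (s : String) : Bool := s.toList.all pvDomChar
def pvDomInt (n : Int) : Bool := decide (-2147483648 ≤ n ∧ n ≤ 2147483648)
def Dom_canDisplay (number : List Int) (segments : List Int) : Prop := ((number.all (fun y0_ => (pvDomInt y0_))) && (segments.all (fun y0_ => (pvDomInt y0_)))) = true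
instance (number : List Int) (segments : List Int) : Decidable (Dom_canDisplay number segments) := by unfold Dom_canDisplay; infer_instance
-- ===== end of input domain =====

-- B replaces A's per-offset sliding-window rescan with a bitap (Shift-And) automaton: one pass
-- over segments carrying a bit-state of live prefix matches, with a memoized per-segment-value
-- mask table — an alternative algorithm, not a claimed speed-up.

-- ===== PORT A =====
-- inner 'for j in range(i, i + len(number))' with its break
def canDisplayInner (number segments : List Int) (i : Int) : List Int → Bool
  | [] => true
  | j :: js =>
    if PySem.Int.band (PySem.List.pyGetD segments j 0) (PySem.List.pyGetD number (j - i) 0)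
        ≠ PySem.List.pyGetD number (j - i) 0 then false
    else canDisplayInner number segments i js

-- outer 'for i in range(len(segments) - len(number) + 1)' with its early return
def canDisplayOuter (number segments : List Int) : List Int → Bool
  | [] => false
  | i :: is =>
    if canDisplayInner number segments i
        (PySem.List.pyRange i (i + PySem.List.len number) 1) then true
    else canDisplayOuter number segments is

def canDisplay (number : List Int) (segments : List Int) : Bool :=
  if PySem.List.len number > PySem.List.len segments then false
  else canDisplayOuter number segments
    (PySem.List.pyRange 0 (PySem.List.len segments - PySem.List.len number + 1) 1)

-- ===== PORT B =====
-- B's values mask/bit/state/goal are nonnegative Python ints throughout; ported as Nat.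
-- inner 'for n in number: if s & n == n: mask |= bit; bit <<= 1'
def maskLoop (s : Int) : List Int → Nat → Nat → Nat
  | [], mask, _ => mask
  | n :: ns, mask, bit =>
    maskLoop s ns (if PySem.Int.band s n = n then mask ||| bit else mask) (bit <<< 1)

-- 'for s in segments: mask = masks.get(s); if mask is None: <maskLoop>; masks[s] = mask;
--  state = ((state << 1) | 1) & mask; if state & goal: return True'
def bitapLoop (number : List Int) (goal : Nat) : PySem.Dict Int Nat → Nat → List Int → Bool
  | _, _, [] => false
  | masks, state, s :: rest =>
    let cached := masks.get? s
    let mask := match cached with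
      | some v => v
      | none => maskLoop s number 0 1
    let masks' := match cached with
      | some _ => masks
      | none => masks.insert s mask
    let st := ((state <<< 1) ||| 1) &&& mask
    if st &&& goal ≠ 0 then true else bitapLoop number goal masks' st rest

def canDisplay_alt (number : List Int) (segments : List Int) : Bool :=
  if number.length = 0 then true
  else if number.length > segments.length then false
  else bitapLoop number (1 <<< (number.length - 1)) PySem.Dict.empty 0 segments

-- ===== PRECONDITION & SPEC =====
def Spec_canDisplay (number : List Int) (segments : List Int) (out : Bool) : Prop := out = canDisplay_alt number segments
instance (number : List Int) (segments : List Int) (out : Bool) : Decidable (Spec_canDisplay number segments out) := by unfold Spec_canDisplay; infer_instance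

-- ===== CLAIM (what is proved, stated in full; the proofs are below) =====
def Claim_equal_canDisplay : Prop := ∀ (number : List Int) (segments : List Int), Dom_canDisplay number segments → Spec_canDisplay number segments (canDisplay number segments)

-- ===== LEMMAS AND PROOFS =====

-- the common specification both programs are reduced to
def FitsAt (nb sg : List Int) (i : Nat) : Prop :=
  ∀ t < nb.length, PySem.Int.band (sg.getD (i + t) 0) (nb.getD t 0) = nb.getD t 0

-- A's old-style suffix scan, used only as a proof intermediary for port A
def fitsHere (tail number : List Int) : Bool :=
  (tail.zip number).all (fun p => PySem.Int.band p.1 p.2 == p.2)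

def canDisplayGo (number : List Int) (tail : List Int) : Bool :=
  if number.length ≤ tail.length then
    if fitsHere tail number then true
    else
      match tail with
      | [] => false
      | _ :: t => canDisplayGo number t
  else false
termination_by tail.length

lemma fitsHere_nil (tail : List Int) : fitsHere tail [] = true := by
  simp [fitsHere]

lemma fitsHere_cons (s n : Int) (ts tn : List Int) :
    fitsHere (s :: ts) (n :: tn) = ((PySem.Int.band s n == n) && fitsHere ts tn) := by
  simp [fitsHere]

lemma inner_eq (nb sg : List Int) (i k : Nat) (h : i + nb.length ≤ sg.length) :
    canDisplayInner nb sg (i : Int)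
      (PySem.List.pyRange ((i : Int) + (k : Int)) ((i : Int) + PySem.List.len nb) 1)
    = fitsHere (sg.drop (i + k)) (nb.drop k) := by
  induction hd : nb.length - k generalizing k with
  | zero =>
    have hk : nb.length ≤ k := by omega
    rw [PySem.List.pyRange_one_eq_nil (by simp [PySem.List.len]; omega)]
    rw [List.drop_eq_nil_of_le hk]
    simp [canDisplayInner, fitsHere_nil]
  | succ d ih =>
    have hk : k < nb.length := by omega
    have hik : i + k < sg.length := by omega
    rw [PySem.List.pyRange_one_cons (by simp [PySem.List.len]; omega)]
    have hsg : PySem.List.pyGetD sg ((i : Int) + (k : Int)) 0 = sg[i + k] := by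
      have : (i : Int) + (k : Int) = ((i + k : Nat) : Int) := by push_cast; ring
      rw [this, PySem.List.pyGetD_natCast, List.getD_eq_getElem _ _ hik]
    have hnb : PySem.List.pyGetD nb ((i : Int) + (k : Int) - (i : Int)) 0 = nb[k] := by
      have : (i : Int) + (k : Int) - (i : Int) = ((k : Nat) : Int) := by ring
      rw [this, PySem.List.pyGetD_natCast, List.getD_eq_getElem _ _ hk]
    have hdropsg : sg.drop (i + k) = sg[i + k] :: sg.drop (i + k + 1) :=
      List.drop_eq_getElem_cons hik
    have hdropnb : nb.drop k = nb[k] :: nb.drop (k + 1) :=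
      List.drop_eq_getElem_cons hk
    rw [canDisplayInner, hsg, hnb, hdropsg, hdropnb, fitsHere_cons]
    by_cases hc : PySem.Int.band sg[i + k] nb[k] = nb[k]
    · simp only [hc, ne_eq, not_true_eq_false, if_false]
      have hstep : (i : Int) + (k : Int) + 1 = (i : Int) + ((k + 1 : Nat) : Int) := by
        push_cast; ring
      rw [hstep, ih (k + 1) (by omega)]
      have : i + (k + 1) = i + k + 1 := by omega
      rw [this]
      simp
    · simp [hc]

lemma outer_eq (nb sg : List Int) (hn : 1 ≤ nb.length) (hm : nb.length ≤ sg.length)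
    (i : Nat) (hi : i ≤ sg.length - nb.length + 1) :
    canDisplayOuter nb sg
      (PySem.List.pyRange (i : Int) ((sg.length : Int) - (nb.length : Int) + 1) 1)
    = canDisplayGo nb (sg.drop i) := by
  induction hd : sg.length - nb.length + 1 - i generalizing i with
  | zero =>
    have hi' : i = sg.length - nb.length + 1 := by omega
    rw [PySem.List.pyRange_one_eq_nil (by omega)]
    rw [canDisplayOuter, canDisplayGo.eq_def]
    rw [if_neg (show ¬ nb.length ≤ (List.drop i sg).length by
      simp only [List.length_drop]; omega)]
  | succ d ih =>
    have hlt : i + nb.length ≤ sg.length := by omega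
    rw [PySem.List.pyRange_one_cons (by omega)]
    rw [canDisplayOuter]
    have hfit : canDisplayInner nb sg (i : Int)
        (PySem.List.pyRange (i : Int) ((i : Int) + PySem.List.len nb) 1)
        = fitsHere (sg.drop i) nb := by
      have := inner_eq nb sg i 0 hlt
      simpa using this
    rw [hfit, canDisplayGo.eq_def]
    have hlen : nb.length ≤ (sg.drop i).length := by simp; omega
    rw [if_pos hlen]
    by_cases hf : fitsHere (sg.drop i) nb = true
    · simp [hf]
    · have hne : sg.drop i = sg[i] :: sg.drop (i + 1) :=
        List.drop_eq_getElem_cons (by omega)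
      simp only [Bool.not_eq_true] at hf
      simp only [hne]
      have hstep : (i : Int) + 1 = ((i + 1 : Nat) : Int) := by push_cast; ring
      rw [hstep, ih (i + 1) (by omega) (by omega)]

-- fitsHere on a suffix is FitsAt
lemma fitsHere_iff (tail nb : List Int) (h : nb.length ≤ tail.length) :
    fitsHere tail nb = true ↔
      ∀ t < nb.length, PySem.Int.band (tail.getD t 0) (nb.getD t 0) = nb.getD t 0 := by
  induction nb generalizing tail with
  | nil => simp [fitsHere_nil]
  | cons n ns ih =>
    match tail with
    | [] => simp at h
    | s :: ts =>
      rw [fitsHere_cons]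
      simp only [List.length_cons] at h ⊢
      constructor
      · intro hg t ht
        rw [Bool.and_eq_true, beq_iff_eq] at hg
        match t with
        | 0 => simpa using hg.1
        | t + 1 =>
          have := (ih ts (by omega)).mp hg.2 t (by omega)
          simpa using this
      · intro hall
        rw [Bool.and_eq_true, beq_iff_eq]
        refine ⟨by simpa using hall 0 (by omega), (ih ts (by omega)).mpr ?_⟩
        intro t ht
        have := hall (t + 1) (by omega)
        simpa using this

lemma getD_drop (sg : List Int) (i t : Nat) :
    (sg.drop i).getD t 0 = sg.getD (i + t) 0 := by
  simp [List.getD, List.getElem?_drop]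

lemma go_spec (nb sg : List Int) (hm1 : 1 ≤ nb.length) (i : Nat) :
    canDisplayGo nb (sg.drop i) = true ↔
      ∃ i', i ≤ i' ∧ i' + nb.length ≤ sg.length ∧ FitsAt nb sg i' := by
  induction hd : sg.length - i generalizing i with
  | zero =>
    rw [canDisplayGo.eq_def]
    rw [if_neg (by simp only [List.length_drop]; omega)]
    constructor
    · intro h; exact absurd h (by simp)
    · rintro ⟨i', h1, h2, _⟩; omega
  | succ d ih =>
    have hi : i < sg.length := by omega
    rw [canDisplayGo.eq_def]
    by_cases hm : nb.length ≤ (sg.drop i).length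
    · rw [if_pos hm]
      simp only [List.length_drop] at hm
      by_cases hf : fitsHere (sg.drop i) nb = true
      · rw [hf]
        constructor
        · intro _
          refine ⟨i, le_refl i, by omega, ?_⟩
          intro t ht
          have := (fitsHere_iff _ _ (by simp; omega)).mp hf t ht
          rwa [getD_drop] at this
        · intro _; rfl
      · rw [if_neg (by simpa using hf)]
        have hne : sg.drop i = sg[i] :: sg.drop (i + 1) :=
          List.drop_eq_getElem_cons hi
        rw [hne]
        have := ih (i + 1) (by omega)
        rw [show (sg.drop (i+1)) = (sg[i] :: sg.drop (i+1)).tail by rfl] at this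
        constructor
        · intro h
          obtain ⟨i', h1, h2, h3⟩ := this.mp (by simpa using h)
          exact ⟨i', by omega, h2, h3⟩
        · rintro ⟨i', h1, h2, h3⟩
          rcases Nat.eq_or_lt_of_le h1 with heq | hlt
          · exfalso
            apply hf
            rw [fitsHere_iff _ _ (by simp; omega)]
            intro t ht
            rw [getD_drop]
            exact heq ▸ h3 t ht
          · simpa using this.mpr ⟨i', by omega, h2, h3⟩
    · rw [if_neg hm]
      simp only [List.length_drop] at hm
      constructor
      · intro h; exact absurd h (by simp)
      · rintro ⟨i', h1, h2, _⟩
        -- suffix shrinks, but nb longer than remaining: no fit at i' ≥ i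
        omega

-- mask characterization
lemma maskLoop_testBit (s : Int) (nb : List Int) (mask c j : Nat) :
    (maskLoop s nb mask (2 ^ c)).testBit j = true ↔
      (mask.testBit j = true ∨ (c ≤ j ∧ j - c < nb.length ∧
        PySem.Int.band s (nb.getD (j - c) 0) = nb.getD (j - c) 0)) := by
  induction nb generalizing mask c with
  | nil => simp [maskLoop]
  | cons n ns ih =>
    rw [maskLoop]
    have hsh : (2 ^ c) <<< 1 = 2 ^ (c + 1) := by
      rw [Nat.shiftLeft_eq]; ring
    rw [hsh, ih]
    by_cases hb : PySem.Int.band s n = n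
    · rw [if_pos hb]
      constructor
      · rintro (h | h)
        · rw [Nat.testBit_or, Bool.or_eq_true, Nat.testBit_two_pow] at h
          rcases h with h | h
          · exact Or.inl h
          · have hjc : c = j := by simpa using h
            subst hjc
            exact Or.inr ⟨le_refl c, by simp, by simpa using hb⟩
        · exact Or.inr ⟨by omega, by simp; omega, by
            have ht : j - c = (j - (c+1)) + 1 := by omega
            rw [ht]; simpa using h.2.2⟩
      · rintro (h | ⟨h1, h2, h3⟩)
        · exact Or.inl (by rw [Nat.testBit_or, Bool.or_eq_true]; exact Or.inl h)
        · rcases Nat.eq_or_lt_of_le h1 with heq | hlt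
          · subst heq
            exact Or.inl (by rw [Nat.testBit_or, Bool.or_eq_true, Nat.testBit_two_pow]; simp)
          · refine Or.inr ⟨by omega, by simp at h2 ⊢; omega, ?_⟩
            have ht : j - c = (j - (c+1)) + 1 := by omega
            rw [ht] at h3
            simpa using h3
    · rw [if_neg hb]
      constructor
      · rintro (h | h)
        · exact Or.inl h
        · exact Or.inr ⟨by omega, by simp; omega, by
            have ht : j - c = (j - (c+1)) + 1 := by omega
            rw [ht]; simpa using h.2.2⟩
      · rintro (h | ⟨h1, h2, h3⟩)
        · exact Or.inl h
        · rcases Nat.eq_or_lt_of_le h1 with heq | hlt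
          · exfalso
            subst heq
            simp at h3
            exact hb h3
          · refine Or.inr ⟨by omega, by simp at h2 ⊢; omega, ?_⟩
            have ht : j - c = (j - (c+1)) + 1 := by omega
            rw [ht] at h3
            simpa using h3

-- the automaton invariant: bit k of the state after consuming j segments says
-- number[0..k] matches segments[j-1-k..j-1]
def StInv (nb sg : List Int) (j : Nat) (state : Nat) : Prop :=
  ∀ k, state.testBit k = true ↔
    (k < nb.length ∧ k + 1 ≤ j ∧
      ∀ t ≤ k, PySem.Int.band (sg.getD (j - 1 - k + t) 0) (nb.getD t 0) = nb.getD t 0)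

lemma stinv_zero (nb sg : List Int) : StInv nb sg 0 0 := by
  intro k
  simp [Nat.zero_testBit]

lemma stinv_step (nb sg : List Int) (j : Nat) (state : Nat)
    (hinv : StInv nb sg j state) :
    StInv nb sg (j + 1) (((state <<< 1) ||| 1) &&& maskLoop (sg.getD j 0) nb 0 1) := by
  intro k
  rw [Nat.testBit_and, Bool.and_eq_true, Nat.testBit_or, Nat.testBit_shiftLeft]
  have hmask := maskLoop_testBit (sg.getD j 0) nb 0 0 k
  rw [pow_zero] at hmask
  constructor
  · rintro ⟨hleft, hright⟩
    rw [hmask] at hright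
    simp only [Nat.zero_testBit] at hright
    rcases hright with h | ⟨_, hk, hfit⟩
    · exact absurd h (by simp)
    · simp only [Nat.sub_zero] at hk hfit
      rw [Bool.or_eq_true] at hleft
      rcases hleft with h | h
      · rw [Bool.and_eq_true] at h
        have hk1 : 1 ≤ k := by simpa using h.1
        have hprev := (hinv (k - 1)).mp h.2
        have hjk : k - 1 + 1 ≤ j := hprev.2.1
        refine ⟨hk, by omega, ?_⟩
        intro t ht
        rcases Nat.lt_or_ge t k with hlt | hge
        · have := hprev.2.2 t (by omega)
          have harith : j - 1 - (k - 1) + t = j + 1 - 1 - k + t := by omega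
          rwa [harith] at this
        · have hteq : t = k := by omega
          have harith : j + 1 - 1 - k + k = j := by omega
          rw [hteq, harith]
          exact hfit
      · have hk0 : k = 0 := Nat.testBit_one_eq_true_iff_self_eq_zero.mp h
        subst hk0
        refine ⟨hk, by omega, ?_⟩
        intro t ht
        have : t = 0 := by omega
        subst this
        have : j + 1 - 1 - 0 + 0 = j := by omega
        rw [this]
        exact hfit
  · rintro ⟨hk, hk1, hfit⟩
    constructor
    · rw [Bool.or_eq_true]
      by_cases hk0 : k = 0
      · exact Or.inr (Nat.testBit_one_eq_true_iff_self_eq_zero.mpr hk0)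
      · exact Or.inl (by
          rw [Bool.and_eq_true]
          refine ⟨by simp; omega, (hinv (k - 1)).mpr ⟨by omega, by omega, ?_⟩⟩
          intro t ht
          have := hfit t (by omega)
          have harith : j + 1 - 1 - k + t = j - 1 - (k - 1) + t := by omega
          rwa [harith] at this)
    · rw [hmask]
      refine Or.inr ⟨by omega, by simpa using hk, ?_⟩
      have := hfit k (le_refl k)
      have harith : j + 1 - 1 - k + k = j := by omega
      rw [harith] at this
      simpa using this

lemma and_two_pow_ne_zero (n i : Nat) : (n &&& 2 ^ i ≠ 0) ↔ n.testBit i = true := by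
  constructor
  · intro h
    by_contra hb
    apply h
    apply Nat.eq_of_testBit_eq
    intro j
    rw [Nat.testBit_and, Nat.testBit_two_pow, Nat.zero_testBit]
    by_cases hij : i = j
    · subst hij
      simp only [Bool.not_eq_true] at hb
      simp [hb]
    · simp [hij]
  · intro h hz
    have : (n &&& 2 ^ i).testBit i = true := by
      rw [Nat.testBit_and, Nat.testBit_two_pow]
      simp [h]
    rw [hz, Nat.zero_testBit] at this
    exact absurd this (by simp)

-- the memo table only ever caches correct masks
def MemoInv (nb : List Int) (masks : PySem.Dict Int Nat) : Prop :=
  ∀ s v, masks.get? s = some v → v = maskLoop s nb 0 1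

lemma bitapLoop_cons (nb : List Int) (goal : Nat) (masks : PySem.Dict Int Nat)
    (state : Nat) (s : Int) (rest : List Int) (hmemo : MemoInv nb masks) :
    bitapLoop nb goal masks state (s :: rest) =
      (if ((state <<< 1) ||| 1) &&& maskLoop s nb 0 1 &&& goal ≠ 0 then true
       else bitapLoop nb goal
         (match masks.get? s with
          | some _ => masks
          | none => masks.insert s (maskLoop s nb 0 1))
         (((state <<< 1) ||| 1) &&& maskLoop s nb 0 1) rest) := by
  rw [bitapLoop]
  cases h : masks.get? s with
  | none => simp only [h]
  | some v =>
    have hv := hmemo s v h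
    simp only [h, hv]

lemma memoinv_step (nb : List Int) (masks : PySem.Dict Int Nat) (s : Int)
    (hmemo : MemoInv nb masks) :
    MemoInv nb (match masks.get? s with
                | some _ => masks
                | none => masks.insert s (maskLoop s nb 0 1)) := by
  cases h : masks.get? s with
  | some v => simpa only [h] using hmemo
  | none =>
    simp only [h]
    intro s' v hv
    rw [PySem.Dict.get?_insert] at hv
    by_cases hs : s' = s
    · rw [if_pos hs] at hv
      subst hs
      simpa using hv.symm
    · rw [if_neg hs] at hv
      exact hmemo s' v hv

lemma bitap_spec (nb sg : List Int) (hm : 1 ≤ nb.length) (j : Nat)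
    (masks : PySem.Dict Int Nat) (state : Nat)
    (hmemo : MemoInv nb masks) (hinv : StInv nb sg j state) :
    bitapLoop nb (2 ^ (nb.length - 1)) masks state (sg.drop j) = true ↔
      ∃ i, i + nb.length ≤ sg.length ∧ j < i + nb.length ∧ FitsAt nb sg i := by
  induction hd : sg.length - j generalizing j masks state with
  | zero =>
    rw [List.drop_eq_nil_of_le (by omega), bitapLoop]
    constructor
    · intro h; exact absurd h (by simp)
    · rintro ⟨i, h1, h2, _⟩; omega
  | succ d ih =>
    have hj : j < sg.length := by omega
    have hne : sg.drop j = sg[j] :: sg.drop (j + 1) := List.drop_eq_getElem_cons hj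
    rw [hne, bitapLoop_cons nb _ masks state _ _ hmemo]
    have hget : sg[j] = sg.getD j 0 := by
      rw [List.getD_eq_getElem _ _ hj]
    rw [hget]
    set st := ((state <<< 1) ||| 1) &&& maskLoop (sg.getD j 0) nb 0 1 with hst
    have hinv' : StInv nb sg (j + 1) st := stinv_step nb sg j state hinv
    have htb := hinv' (nb.length - 1)
    by_cases hbit : st.testBit (nb.length - 1) = true
    · rw [if_pos (by rwa [and_two_pow_ne_zero])]
      obtain ⟨_, hj1, hfit⟩ := htb.mp hbit
      constructor
      · intro _
        refine ⟨j + 1 - nb.length, by omega, by omega, ?_⟩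
        intro t ht
        have := hfit t (by omega)
        have harith : j + 1 - 1 - (nb.length - 1) + t = j + 1 - nb.length + t := by omega
        rwa [harith] at this
      · intro _; rfl
    · rw [if_neg (by rw [and_two_pow_ne_zero]; exact hbit)]
      rw [ih (j + 1) _ st (memoinv_step nb masks (sg.getD j 0) hmemo) hinv' (by omega)]
      constructor
      · rintro ⟨i, h1, h2, h3⟩
        exact ⟨i, h1, by omega, h3⟩
      · rintro ⟨i, h1, h2, h3⟩
        rcases Nat.lt_or_ge (j + 1) (i + nb.length) with hlt | hge
        · exact ⟨i, h1, hlt, h3⟩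
        · exfalso
          apply hbit
          have hiem : i + nb.length = j + 1 := by omega
          rw [htb]
          refine ⟨by omega, by omega, ?_⟩
          intro t ht
          have := h3 t (by omega)
          have harith : j + 1 - 1 - (nb.length - 1) + t = i + t := by omega
          rw [harith]
          exact this

-- ===== VERDICT (by name: the statement is the Claim_ definition above) =====
theorem canDisplay_spec : Claim_equal_canDisplay := by
  intro nb sg _
  unfold Spec_canDisplay canDisplay canDisplay_alt
  by_cases hgt : sg.length < nb.length
  · rw [if_pos (by simp [PySem.List.len]; omega)]
    rw [if_neg (by omega), if_pos (by omega)]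
  · rw [Nat.not_lt] at hgt
    rw [if_neg (by simp [PySem.List.len]; omega)]
    by_cases hz : nb.length = 0
    · -- number empty: both sides are true
      have hnb : nb = [] := List.eq_nil_of_length_eq_zero hz
      subst hnb
      rw [if_pos (show ([] : List Int).length = 0 from rfl)]
      rw [PySem.List.pyRange_one_cons (by
        simp only [PySem.List.len_eq, List.length_nil]; omega)]
      rw [canDisplayOuter]
      have hinn : canDisplayInner [] sg 0 (PySem.List.pyRange 0 (0 + PySem.List.len ([] : List Int)) 1) = true := by
        simp [PySem.List.len, PySem.List.pyRange_one_eq_nil, canDisplayInner]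
      rw [hinn]
      simp
    · rw [if_neg hz, if_neg (by omega)]
      have hA : canDisplayOuter nb sg
          (PySem.List.pyRange 0 (PySem.List.len sg - PySem.List.len nb + 1) 1)
          = canDisplayGo nb sg := by
        have := outer_eq nb sg (by omega) hgt 0 (by omega)
        simp only [Nat.cast_zero, List.drop_zero] at this
        simpa [PySem.List.len] using this
      rw [hA]
      have hAgo : canDisplayGo nb sg = true ↔
          ∃ i, i + nb.length ≤ sg.length ∧ FitsAt nb sg i := by
        have := go_spec nb sg (by omega) 0
        simp only [List.drop_zero] at this
        rw [this]
        constructor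
        · rintro ⟨i, _, h2, h3⟩; exact ⟨i, h2, h3⟩
        · rintro ⟨i, h2, h3⟩; exact ⟨i, Nat.zero_le i, h2, h3⟩
      have hBgo : bitapLoop nb (1 <<< (nb.length - 1)) PySem.Dict.empty 0 sg = true ↔
          ∃ i, i + nb.length ≤ sg.length ∧ FitsAt nb sg i := by
        have hgoal : (1 : Nat) <<< (nb.length - 1) = 2 ^ (nb.length - 1) := by
          rw [Nat.shiftLeft_eq, one_mul]
        rw [hgoal]
        have := bitap_spec nb sg (by omega) 0 PySem.Dict.empty 0
          (fun s v hv => by rw [PySem.Dict.get?_empty] at hv; exact absurd hv (by simp))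
          (stinv_zero nb sg)
        simp only [List.drop_zero] at this
        rw [this]
        constructor
        · rintro ⟨i, h1, _, h3⟩; exact ⟨i, h1, h3⟩
        · rintro ⟨i, h1, h3⟩
          exact ⟨i, h1, Nat.lt_of_lt_of_le (Nat.pos_of_ne_zero hz) (Nat.le_add_left _ _), h3⟩
      rw [Bool.eq_iff_iff, hAgo, hBgo]
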